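-- pv_equiv track=rewrite | github.com/MassEast/pi_dashboard | PiDashboard.py | _apply_departure_delay
-- ===== SOURCE A (Python) =====
-- def _apply_departure_delay(departure_time, delay_minutes):
--     try:
--         parts = departure_time.split(":")
--         if len(parts) != 2:
--             return departure_time
--
--         hours = int(parts[0])
--         minutes = int(parts[1]) + int(delay_minutes)
--
--         while minutes >= 60:
--             hours += 1
--             minutes -= 60
--         while minutes < 0:
--             hours -= 1
--             minutes += 60
--
--         hours %= 24
--         return f"{hours:02d}:{minutes:02d}"
--     except (TypeError, ValueError, IndexError):
--         return departure_time
-- ===== SOURCE B (Python) =====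
-- def _apply_departure_delay(departure_time, delay_minutes):
--     try:
--         parts = departure_time.split(":")
--         if len(parts) != 2:
--             return departure_time
--
--         carry, minutes = divmod(int(parts[1]) + int(delay_minutes), 60)
--         hours = (int(parts[0]) + carry) % 24
--         return f"{hours:02d}:{minutes:02d}"
--     except (TypeError, ValueError, IndexError):
--         return departure_time
-- ===== Notes on version B (the rewrite author's own statement) =====
-- stated objective: simpler
-- what changed: Replaces the two normalization while-loops (stepping by 60 until the minutes land in [0,60)) with one closed-form divmod(total, 60), folding the carry into the hours before the %24.
import Mathlib
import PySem

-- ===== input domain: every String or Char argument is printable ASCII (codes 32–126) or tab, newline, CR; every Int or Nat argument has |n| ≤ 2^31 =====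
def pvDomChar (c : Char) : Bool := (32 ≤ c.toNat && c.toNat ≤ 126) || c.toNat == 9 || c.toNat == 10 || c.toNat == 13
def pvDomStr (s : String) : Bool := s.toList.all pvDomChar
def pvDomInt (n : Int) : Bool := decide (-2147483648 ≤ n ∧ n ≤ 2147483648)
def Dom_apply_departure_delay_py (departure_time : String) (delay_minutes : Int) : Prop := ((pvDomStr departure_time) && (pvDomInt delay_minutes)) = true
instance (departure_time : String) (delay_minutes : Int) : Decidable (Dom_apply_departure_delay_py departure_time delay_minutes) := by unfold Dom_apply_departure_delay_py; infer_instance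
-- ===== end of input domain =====

-- B replaces A's two while-loops (repeatedly moving 60 minutes into the hour) by one closed-form divmod; objective: simpler.

-- ===== PORT A =====
-- f"{n:02d}" for 0 ≤ n < 100 (the only values formatted here: hours % 24 and minutes in [0,60)): pad str(n) to two chars with '0'
def pvPad2 (n : Int) : List Char :=
  let cs := PySem.Int.toChars n
  if cs.length < 2 then '0' :: cs else cs

-- while minutes >= 60: hours += 1; minutes -= 60
def pvLoop1 (hours minutes : Int) : Int × Int :=
  if 60 ≤ minutes then pvLoop1 (hours + 1) (minutes - 60) else (hours, minutes)
termination_by minutes.toNat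
decreasing_by omega

-- while minutes < 0: hours -= 1; minutes += 60
def pvLoop2 (hours minutes : Int) : Int × Int :=
  if minutes < 0 then pvLoop2 (hours - 1) (minutes + 60) else (hours, minutes)
termination_by (-minutes).toNat
decreasing_by omega

def apply_departure_delay_py (departure_time : String) (delay_minutes : Int) : String :=
  match PySem.Str.split? departure_time ":" with  -- sep ":" ≠ "" so split? is always `some`
  | some [p0, p1] =>  -- len(parts) == 2; int() raising ValueError is the `none` branch (except returns the input)
    match PySem.Int.ofStr? p0, PySem.Int.ofStr? p1 with
    | some h, some m =>
      let st := pvLoop1 h (m + delay_minutes)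
      let st2 := pvLoop2 st.1 st.2
      String.ofList (pvPad2 (PySem.Int.mod st2.1 24) ++ ':' :: pvPad2 st2.2)
    | _, _ => departure_time
  | _ => departure_time

-- ===== PORT B =====
-- the `if len(parts) != 2` guard: the pair of parts, or none
def pvTwoParts (parts? : Option (List String)) : Option (String × String) :=
  parts?.bind (fun parts => if h : parts.length = 2 then some (parts[0], parts[1]) else none)

-- f"{n:02d}" again for B (B's own helper; values here are always in [0,60))
def pvPad2B (n : Int) : List Char :=
  let cs := PySem.Int.toChars n
  if cs.length < 2 then '0' :: cs else cs

def apply_departure_delay_py_alt (departure_time : String) (delay_minutes : Int) : String :=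
  (pvTwoParts (PySem.Str.split? departure_time ":")).elim departure_time (fun (p : String × String) =>
    ((PySem.Int.ofStr? p.1).bind (fun h => (PySem.Int.ofStr? p.2).map (fun m =>
      -- carry, minutes = divmod(total, 60): divisor is the nonzero literal 60, so divmod? = some (floordiv, mod)
      let total := m + delay_minutes
      let carry := PySem.Int.floordiv total 60
      let minutes := PySem.Int.mod total 60
      let hours := PySem.Int.mod (h + carry) 24
      String.ofList (pvPad2B hours ++ ':' :: pvPad2B minutes)))).getD departure_time)

-- ===== PRECONDITION & SPEC =====
def Spec_apply_departure_delay_py (departure_time : String) (delay_minutes : Int) (out : String) : Prop := out = apply_departure_delay_py_alt departure_time delay_minutes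
instance (departure_time : String) (delay_minutes : Int) (out : String) : Decidable (Spec_apply_departure_delay_py departure_time delay_minutes out) := by unfold Spec_apply_departure_delay_py; infer_instance

-- ===== CLAIM (what is proved, stated in full; the proofs are below) =====
def Claim_equal_apply_departure_delay_py : Prop := ∀ (departure_time : String) (delay_minutes : Int), Dom_apply_departure_delay_py departure_time delay_minutes → Spec_apply_departure_delay_py departure_time delay_minutes (apply_departure_delay_py departure_time delay_minutes)

-- ===== LEMMAS AND PROOFS =====
lemma pvLoop1_of_lt (h m : Int) (hm : m < 60) : pvLoop1 h m = (h, m) := by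
  unfold pvLoop1; rw [if_neg (by omega)]

lemma pvLoop1_spec (h m : Int) (hm : 0 ≤ m) :
    pvLoop1 h m = (h + PySem.Int.floordiv m 60, PySem.Int.mod m 60) := by
  rw [PySem.Int.floordiv_eq_ediv_of_pos (by omega), PySem.Int.mod_eq_emod_of_pos (by omega)]
  induction h, m using pvLoop1.induct with
  | case1 h m hge ih =>
    rw [pvLoop1, if_pos hge, ih (by omega)]
    simp only [Prod.mk.injEq]; omega
  | case2 h m hlt =>
    rw [pvLoop1, if_neg hlt]
    simp only [Prod.mk.injEq]; omega

lemma pvLoop2_spec (h m : Int) (hm : m < 60) :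
    pvLoop2 h m = (h + PySem.Int.floordiv m 60, PySem.Int.mod m 60) := by
  rw [PySem.Int.floordiv_eq_ediv_of_pos (by omega), PySem.Int.mod_eq_emod_of_pos (by omega)]
  induction h, m using pvLoop2.induct with
  | case1 h m hneg ih =>
    rw [pvLoop2, if_pos hneg, ih (by omega)]
    simp only [Prod.mk.injEq]; omega
  | case2 h m hge =>
    rw [pvLoop2, if_neg hge]
    simp only [Prod.mk.injEq]; omega

-- the two loops together normalize (h, m) to (h + m // 60, m % 60)
lemma pvLoops_spec (h m : Int) :
    pvLoop2 (pvLoop1 h m).1 (pvLoop1 h m).2 =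
      (h + PySem.Int.floordiv m 60, PySem.Int.mod m 60) := by
  by_cases hm : 0 ≤ m
  · rw [pvLoop1_spec h m hm]
    have h2 : PySem.Int.mod m 60 < 60 := PySem.Int.mod_lt m (by omega)
    rw [pvLoop2_spec _ _ h2,
        PySem.Int.mod_eq_emod_of_pos (a := m) (by omega),
        PySem.Int.floordiv_eq_ediv_of_pos (a := m) (by omega),
        PySem.Int.floordiv_eq_ediv_of_pos (a := m % 60) (by omega),
        PySem.Int.mod_eq_emod_of_pos (a := m % 60) (by omega)]
    simp only [Prod.mk.injEq]; omega
  · rw [pvLoop1_of_lt h m (by omega), pvLoop2_spec h m (by omega)]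

-- ===== VERDICT (by name: the statement is the Claim_ definition above) =====
theorem apply_departure_delay_py_spec : Claim_equal_apply_departure_delay_py := by
  intro departure_time delay_minutes _
  unfold Spec_apply_departure_delay_py apply_departure_delay_py apply_departure_delay_py_alt
  cases hsp : PySem.Str.split? departure_time ":" with
  | none => rfl
  | some parts =>
    match parts with
    | [] => rfl
    | [_] => rfl
    | _ :: _ :: _ :: _ => rfl
    | [p0, p1] =>
      cases hp0 : PySem.Int.ofStr? p0 with
      | none => cases PySem.Int.ofStr? p1 <;> simp [pvTwoParts, hp0]
      | some h =>
        cases hp1 : PySem.Int.ofStr? p1 with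
        | none => simp [pvTwoParts, hp0, hp1]
        | some m =>
          simp [pvTwoParts, hp0, hp1, pvLoops_spec, pvPad2, pvPad2B]
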